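-- pv_equiv track=rewrite | github.com/afterhoon/programmers | 42840.py | solution
-- ===== SOURCE A (Python) =====
-- def solution(answers):
--     answer = []
--     index = [0, 0, 0]
--     score = [0, 0, 0]
--     pattern = [[1, 2, 3, 4, 5], [2, 1, 2, 3, 2, 4, 2, 5], [3, 3, 1, 1, 2, 2, 4, 4, 5, 5]]
--     length = [5, 8, 10]
--
--     for i in range(len(answers)):
--         for j in range(3):
--             if pattern[j][index[j]] == answers[i]:
--                 score[j] += 1
--             index[j] = (index[j] + 1) % length[j]
--
--     _max = 0
--     for i in range(3):
--         if _max < score[i]: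
--             _max = score[i]
--             answer.clear()
--             answer.append(i+1)
--         elif _max == score[i]:
--             answer.append(i+1)
--     return answer
-- ===== SOURCE B (Python) =====
-- def solution(answers):
--     # Bucket-count approach: the three patterns repeat jointly with period lcm(5,8,10)=40,
--     # so a frequency table keyed by (position mod 40, answer value), built in one pass,
--     # determines every supervisor's score by 40 table lookups each.
--     patterns = [[1, 2, 3, 4, 5], [2, 1, 2, 3, 2, 4, 2, 5], [3, 3, 1, 1, 2, 2, 4, 4, 5, 5]]
--     freq = {}
--     for i, a in enumerate(answers):
--         key = (i % 40, a)
--         freq[key] = freq.get(key, 0) + 1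
--     scores = [sum(freq.get((r, p[r % len(p)]), 0) for r in range(40)) for p in patterns]
--     m = max(scores)
--     return [j + 1 for j in range(3) if scores[j] == m]
-- ===== Notes on version B (the rewrite author's own statement) =====
-- stated objective: alternative
-- what changed: B replaces A's interleaved scan with three pattern cursors by a frequency table: one pass buckets answers by (index mod 40, value) -- 40 = lcm of the pattern lengths -- and each supervisor's score is then read off with 40 table lookups; winners via max + filter instead of a running-max loop.
import Mathlib
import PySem

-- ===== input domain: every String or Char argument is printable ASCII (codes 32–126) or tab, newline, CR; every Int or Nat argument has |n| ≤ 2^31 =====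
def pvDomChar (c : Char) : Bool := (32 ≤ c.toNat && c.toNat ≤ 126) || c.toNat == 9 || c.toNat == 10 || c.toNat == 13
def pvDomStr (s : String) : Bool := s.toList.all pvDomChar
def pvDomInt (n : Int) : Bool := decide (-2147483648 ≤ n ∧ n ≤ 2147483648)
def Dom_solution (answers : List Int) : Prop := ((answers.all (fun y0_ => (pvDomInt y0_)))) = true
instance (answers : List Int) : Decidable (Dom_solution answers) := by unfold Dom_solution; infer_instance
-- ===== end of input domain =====

-- B replaces A's interleaved scan with three pattern cursors by a frequency table keyed by
-- (index mod 40, answer value) — 40 = lcm of the pattern lengths — built in one pass; each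
-- supervisor's score is then read off with 40 table lookups, and winners via max + filter.
-- Objective: alternative data structure, same cost.

-- ===== PORT A =====
-- literal transliteration of A; the two loop bodies are named helpers (trialStep = the body of
-- 'for j in range(3)', selStep = the body of the final running-max loop), otherwise step for step.
-- Python list assignment 'xs[j] = v' is List.set j.toNat (exact here: j ∈ {0,1,2} is in range).
def trialStep (a : Int) (st : List Int × List Int) : List Int × List Int :=
  (PySem.List.pyRange 0 3 1).foldl
    (fun (st : List Int × List Int) (j : Int) =>
      let index := st.1
      let score := st.2
      let score' :=
        if PySem.List.pyGetD
             (PySem.List.pyGetD ([[1,2,3,4,5],[2,1,2,3,2,4,2,5],[3,3,1,1,2,2,4,4,5,5]] : List (List Int)) j [])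
             (PySem.List.pyGetD index j 0) 0 = a then
          score.set j.toNat (PySem.List.pyGetD score j 0 + 1)
        else score
      let index' :=
        index.set j.toNat
          (PySem.Int.mod (PySem.List.pyGetD index j 0 + 1) (PySem.List.pyGetD ([5,8,10] : List Int) j 0))
      (index', score'))
    st

def selStep (score : List Int) (ms : Int × List Int) (i : Int) : Int × List Int :=
  let s := PySem.List.pyGetD score i 0
  if ms.1 < s then (s, [i + 1])
  else if ms.1 = s then (ms.1, ms.2 ++ [i + 1])
  else ms

def solution (answers : List Int) : List Int :=
  let st :=
    (PySem.List.pyRange 0 (PySem.List.len answers) 1).foldl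
      (fun (st : List Int × List Int) (i : Int) => trialStep (PySem.List.pyGetD answers i 0) st)
      ([0, 0, 0], [0, 0, 0])
  let score := st.2
  let fin := (PySem.List.pyRange 0 3 1).foldl (selStep score) (0, [])
  fin.2

-- ===== PORT B =====
-- freq[(i % 40, a)] = freq.get((i % 40, a), 0) + 1 over enumerate(answers)
def buildFreq (answers : List Int) : PySem.Dict (Int × Int) Int :=
  (PySem.List.enumerate answers 0).foldl
    (fun (d : PySem.Dict (Int × Int) Int) (ia : Int × Int) =>
      let key := (PySem.Int.mod ia.1 40, ia.2)
      d.insert key (d.getD key 0 + 1))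
    PySem.Dict.empty

-- sum(freq.get((r, p[r % len(p)]), 0) for r in range(40))
def scoreOf (freq : PySem.Dict (Int × Int) Int) (p : List Int) : Int :=
  (PySem.List.pyRange 0 40 1).foldl
    (fun (s : Int) (r : Int) =>
      s + freq.getD (r, PySem.List.pyGetD p (PySem.Int.mod r (PySem.List.len p)) 0) 0)
    0

def solution_alt (answers : List Int) : List Int :=
  let patterns : List (List Int) := [[1,2,3,4,5],[2,1,2,3,2,4,2,5],[3,3,1,1,2,2,4,4,5,5]]
  let freq := buildFreq answers
  let scores := patterns.map (fun p => scoreOf freq p)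
  let m := (PySem.List.max? scores (fun x => x)).getD 0   -- scores is nonempty: getD never fires
  ((PySem.List.pyRange 0 3 1).filter (fun j => PySem.List.pyGetD scores j 0 = m)).map
    (fun j => j + 1)

-- ===== PRECONDITION & SPEC =====
def Spec_solution (answers : List Int) (out : List Int) : Prop := out = solution_alt answers
instance (answers : List Int) (out : List Int) : Decidable (Spec_solution answers out) := by unfold Spec_solution; infer_instance

-- ===== CLAIM (what is proved, stated in full; the proofs are below) =====
def Claim_equal_solution : Prop := ∀ (answers : List Int), Dom_solution answers → Spec_solution answers (solution answers)

-- ===== LEMMAS AND PROOFS =====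

-- matches of pattern p against ans, with the cursor starting at position n
def cnt (p : List Int) (n : Nat) (ans : List Int) : Int :=
  match ans with
  | [] => 0
  | a :: t => (if PySem.List.pyGetD p ((n % p.length : Nat) : Int) 0 = a then 1 else 0) + cnt p (n + 1) t

lemma cnt_nonneg (p : List Int) (ans : List Int) : ∀ (n : Nat), 0 ≤ cnt p n ans := by
  induction ans with
  | nil => intro n; simp [cnt]
  | cons a t ih =>
    intro n
    have := ih (n + 1)
    simp only [cnt]
    split_ifs <;> omega

-- one step of A's interleaved pass, with the three cursors at positions n % 5, n % 8, n % 10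
set_option maxHeartbeats 1000000 in
lemma innerA (n : Nat) (s1 s2 s3 a : Int) :
    trialStep a ([((n % 5 : Nat) : Int), ((n % 8 : Nat) : Int), ((n % 10 : Nat) : Int)], [s1, s2, s3])
    = ([(((n + 1) % 5 : Nat) : Int), (((n + 1) % 8 : Nat) : Int), (((n + 1) % 10 : Nat) : Int)],
       [s1 + (if PySem.List.pyGetD [1,2,3,4,5] ((n % 5 : Nat) : Int) 0 = a then 1 else 0),
        s2 + (if PySem.List.pyGetD [2,1,2,3,2,4,2,5] ((n % 8 : Nat) : Int) 0 = a then 1 else 0),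
        s3 + (if PySem.List.pyGetD [3,3,1,1,2,2,4,4,5,5] ((n % 10 : Nat) : Int) 0 = a then 1 else 0)]) := by
  unfold trialStep
  have h3 : PySem.List.pyRange 0 3 1 = [0, 1, 2] := by decide
  rw [h3]
  have hm5 : PySem.Int.mod (((n % 5 : Nat) : Int) + 1) 5 = (((n + 1) % 5 : Nat) : Int) := by
    have := PySem.Int.mod_natCast (n % 5 + 1) 5
    push_cast at this ⊢; omega
  have hm8 : PySem.Int.mod (((n % 8 : Nat) : Int) + 1) 8 = (((n + 1) % 8 : Nat) : Int) := by
    have := PySem.Int.mod_natCast (n % 8 + 1) 8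
    push_cast at this ⊢; omega
  have hm10 : PySem.Int.mod (((n % 10 : Nat) : Int) + 1) 10 = (((n + 1) % 10 : Nat) : Int) := by
    have := PySem.Int.mod_natCast (n % 10 + 1) 10
    push_cast at this ⊢; omega
  simp only [List.foldl_cons, List.foldl_nil]
  have ht : (2 : Int).toNat = 2 := rfl
  norm_num [PySem.List.pyGetD, List.set, ht, hm5, hm8, hm10]
  split_ifs <;> simp

-- A's whole interleaved pass computes the three independent counts
set_option maxHeartbeats 1000000 in
lemma stepA (ans : List Int) : ∀ (n : Nat) (s1 s2 s3 : Int),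
    ans.foldl (fun (st : List Int × List Int) (a : Int) => trialStep a st)
      ([((n % 5 : Nat) : Int), ((n % 8 : Nat) : Int), ((n % 10 : Nat) : Int)], [s1, s2, s3])
    = ([(((n + ans.length) % 5 : Nat) : Int), (((n + ans.length) % 8 : Nat) : Int), (((n + ans.length) % 10 : Nat) : Int)],
       [s1 + cnt [1,2,3,4,5] n ans, s2 + cnt [2,1,2,3,2,4,2,5] n ans, s3 + cnt [3,3,1,1,2,2,4,4,5,5] n ans]) := by
  induction ans with
  | nil => intro n s1 s2 s3; simp [cnt]
  | cons a t ih =>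
    intro n s1 s2 s3
    rw [List.foldl_cons]
    rw [innerA n s1 s2 s3 a, ih (n + 1)]
    simp only [cnt, List.length_cons]
    simp only [Prod.mk.injEq, List.cons.injEq, and_true]
    refine ⟨⟨?_, ?_, ?_⟩, ?_, ?_, ?_⟩ <;> first | (push_cast; omega) | (norm_num; ring)

-- B's frequency table: every lookup is a count of keys (i % 40, a_i)
lemma getD_buildFreq (ans : List Int) (k : Int × Int) :
    (buildFreq ans).getD k 0
    = (((PySem.List.enumerate ans 0).map (fun ia => (PySem.Int.mod ia.1 40, ia.2))).count k : Int) := by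
  unfold buildFreq
  rw [← List.foldl_map (f := fun ia : Int × Int => (PySem.Int.mod ia.1 40, ia.2))
        (g := fun (d : PySem.Dict (Int × Int) Int) (key : Int × Int) => d.insert key (d.getD key 0 + 1))]
  rw [PySem.Dict.getD_foldl_insert_add_one]
  simp

-- a 0/1 indicator summed over a Nodup list containing m once
lemma sum_delta_zero (g : Int → Int) (a m : Int) (l : List Int) (hm : m ∉ l) :
    (l.map (fun r => if ((m, a) : Int × Int) = (r, g r) then (1:Int) else 0)).sum = 0 := by
  induction l with
  | nil => simp
  | cons x xs ih =>
    have hx : ((m, a) : Int × Int) ≠ (x, g x) := by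
      intro h
      have hmx : m = x := congrArg Prod.fst h
      subst hmx
      exact hm (by simp)
    simp only [List.map_cons, List.sum_cons, if_neg hx, zero_add]
    exact ih (fun h => hm (List.mem_cons_of_mem _ h))

lemma sum_delta (g : Int → Int) (a m : Int) : ∀ (l : List Int), l.Nodup → m ∈ l →
    (l.map (fun r => if ((m, a) : Int × Int) = (r, g r) then (1:Int) else 0)).sum
    = if a = g m then 1 else 0 := by
  intro l
  induction l with
  | nil => intro _ h; cases h
  | cons x xs ih =>
    intro hnd hmem
    simp only [List.map_cons, List.sum_cons]
    by_cases hmx : m = x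
    · subst hmx
      rw [sum_delta_zero g a m xs (List.nodup_cons.mp hnd).1]
      by_cases h : a = g m
      · rw [if_pos (by rw [h]), if_pos h]; ring
      · rw [if_neg (by simp [Prod.mk.injEq, h]), if_neg h]; ring
    · have hx : ((m, a) : Int × Int) ≠ (x, g x) := fun h => hmx (congrArg Prod.fst h)
      rw [if_neg hx, ih (List.nodup_cons.mp hnd).2 ((List.mem_cons.mp hmem).resolve_left hmx)]
      ring

-- the 40 lookups for pattern p sum to the match count of p (p's length divides 40)
lemma sumCount (p : List Int) (hdvd : p.length ∣ 40) : ∀ (ans : List Int) (n : Nat),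
    ((PySem.List.pyRange 0 40 1).map
       (fun r => ((((PySem.List.enumerate ans (n : Int)).map (fun ia => (PySem.Int.mod ia.1 40, ia.2))).count
          (r, PySem.List.pyGetD p (PySem.Int.mod r (PySem.List.len p)) 0)) : Int))).sum
    = cnt p n ans := by
  intro ans
  induction ans with
  | nil =>
    intro n
    simp [PySem.List.enumerate_nil, cnt]
  | cons a t ih =>
    intro n
    rw [PySem.List.enumerate_cons]
    simp only [List.map_cons, List.count_cons, beq_iff_eq]
    push_cast
    rw [PySem.List.sum_map_add_int]
    have hc : ((n : Int) + 1) = ((n + 1 : Nat) : Int) := by push_cast; ring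
    rw [hc, ih (n + 1)]
    have hmn : PySem.Int.mod ((n : Int)) 40 = ((n % 40 : Nat) : Int) := by
      exact_mod_cast PySem.Int.mod_natCast n 40
    have hidx : PySem.Int.mod ((n % 40 : Nat) : Int) (PySem.List.len p)
        = ((n % p.length : Nat) : Int) := by
      rw [PySem.List.len_eq, PySem.Int.mod_natCast, Nat.mod_mod_of_dvd n hdvd]
    have hδ : ((PySem.List.pyRange 0 40 1).map
        (fun r => if ((((n % 40 : Nat) : Int), a) : Int × Int)
            = (r, PySem.List.pyGetD p (PySem.Int.mod r (PySem.List.len p)) 0) then (1:Int) else 0)).sum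
        = if a = PySem.List.pyGetD p (PySem.Int.mod ((n % 40 : Nat) : Int) (PySem.List.len p)) 0 then 1 else 0 := by
      apply sum_delta
      · decide
      · rw [PySem.List.mem_pyRange_one]
        constructor
        · exact_mod_cast Nat.zero_le _
        · exact_mod_cast Nat.mod_lt _ (by norm_num)
    rw [hmn]
    rw [hδ, hidx]
    simp only [cnt]
    by_cases h : PySem.List.pyGetD p ((n % p.length : Nat) : Int) 0 = a
    · rw [if_pos h.symm, if_pos h]; ring
    · rw [if_neg (fun hh => h hh.symm), if_neg h]; ring

-- B's score for pattern p is the match count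
lemma scoreOf_eq (p ans : List Int) (hdvd : p.length ∣ 40) :
    scoreOf (buildFreq ans) p = cnt p 0 ans := by
  unfold scoreOf
  rw [PySem.List.foldl_add]
  rw [List.map_congr_left (fun r _ => getD_buildFreq ans (r, PySem.List.pyGetD p (PySem.Int.mod r (PySem.List.len p)) 0))]
  rw [zero_add]
  have h := sumCount p hdvd ans 0
  simpa using h

-- A's running-max selection loop = max + filter, for nonnegative scores
set_option maxHeartbeats 2000000 in
lemma sel_eq (c1 c2 c3 : Int) (h1 : 0 ≤ c1) (h2 : 0 ≤ c2) (h3n : 0 ≤ c3) :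
    ((PySem.List.pyRange 0 3 1).foldl (selStep [c1, c2, c3]) (0, [])).2
    = ((PySem.List.pyRange 0 3 1).filter
        (fun j => PySem.List.pyGetD [c1, c2, c3] j 0 = ((PySem.List.max? [c1, c2, c3] (fun x => x)).getD 0))).map
        (fun j => j + 1) := by
  unfold selStep
  have h3 : PySem.List.pyRange 0 3 1 = [0, 1, 2] := by decide
  rw [h3]
  simp only [List.foldl_cons, List.foldl_nil, List.filter_cons, List.filter_nil,
    PySem.List.max?_id_cons, Option.getD_some, decide_eq_true_eq]
  have ht : (2 : Int).toNat = 2 := rfl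
  norm_num [PySem.List.pyGetD, Int.max_def, ht, List.getElem_cons_succ, List.getElem_cons_zero]
  split_ifs <;> first | rfl | (exfalso; omega)

-- ===== VERDICT (by name: the statement is the Claim_ definition above) =====
theorem solution_spec : Claim_equal_solution := by
  intro answers _
  unfold Spec_solution solution solution_alt
  simp only [List.map_cons, List.map_nil]
  rw [PySem.List.foldl_pyRange_zero_pyGetD answers 0
    (fun (st : List Int × List Int) (a : Int) => trialStep a st) ([0, 0, 0], [0, 0, 0])]
  have h0 : (([0, 0, 0], [0, 0, 0]) : List Int × List Int)
      = ([((0 % 5 : Nat) : Int), ((0 % 8 : Nat) : Int), ((0 % 10 : Nat) : Int)], [(0 : Int), 0, 0]) := by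
    norm_num
  rw [h0, stepA answers 0 0 0 0]
  have e1 := scoreOf_eq [1,2,3,4,5] answers (by norm_num)
  have e2 := scoreOf_eq [2,1,2,3,2,4,2,5] answers (by norm_num)
  have e3 := scoreOf_eq [3,3,1,1,2,2,4,4,5,5] answers (by norm_num)
  simp only [e1, e2, e3]
  norm_num
  exact sel_eq _ _ _ (cnt_nonneg _ _ 0) (cnt_nonneg _ _ 0) (cnt_nonneg _ _ 0)
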